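-- pv_equiv track=rewrite | github.com/Wenfuuu/model-quantization-sentiment-analysis | src/evaluation/faithfulness.py | _build_comprehensiveness_text_word
-- ===== SOURCE A (Python) =====
-- from typing import Dict, List, Optional, Sequence, Tuple
--
-- def _build_comprehensiveness_text_word(
--     words: List[str],
--     top_indices: List[int],
--     mask_token: str = "[MASK]",
-- ) -> str:
--     selected_set = set(top_indices)
--     masked_words = [
--         mask_token if i in selected_set else w
--         for i, w in enumerate(words)
--     ]
--     return " ".join(masked_words).strip()
-- ===== SOURCE B (Python) =====
-- def _build_comprehensiveness_text_word(words, top_indices, mask_token="[MASK]"):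
--     result = list(words)
--     n = len(result)
--     for i in top_indices:
--         if 0 <= i < n:
--             result[i] = mask_token
--     return " ".join(result).strip()
-- ===== Notes on version B (the rewrite author's own statement) =====
-- stated objective: alternative
-- what changed: B copies the words list once and scatters the mask token into positions driven by top_indices (with a bounds guard), instead of A's scan over all words testing set membership per position.
import Mathlib
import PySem

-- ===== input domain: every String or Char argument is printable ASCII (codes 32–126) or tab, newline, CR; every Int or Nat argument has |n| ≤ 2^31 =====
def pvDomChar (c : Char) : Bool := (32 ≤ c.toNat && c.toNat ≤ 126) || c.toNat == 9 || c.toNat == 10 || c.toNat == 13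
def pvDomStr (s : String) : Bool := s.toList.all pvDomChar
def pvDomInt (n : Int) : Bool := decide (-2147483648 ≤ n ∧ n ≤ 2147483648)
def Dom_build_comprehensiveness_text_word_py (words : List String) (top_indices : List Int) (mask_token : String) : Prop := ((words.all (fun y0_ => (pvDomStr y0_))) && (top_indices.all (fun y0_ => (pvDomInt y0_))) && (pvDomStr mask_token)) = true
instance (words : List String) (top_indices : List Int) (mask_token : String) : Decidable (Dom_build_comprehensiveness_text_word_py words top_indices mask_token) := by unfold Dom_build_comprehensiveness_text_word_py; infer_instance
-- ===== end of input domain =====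

-- B scatters the mask token into index-driven positions over a copy of the words list
-- instead of A's membership-tested scan over all positions; same cost, different decomposition.

-- ===== PORT A =====
def build_comprehensiveness_text_word_py (words : List String) (top_indices : List Int) (mask_token : String) : String :=
  let selected : PySem.Set Int := PySem.Set.ofList top_indices
  let masked : List String :=
    (PySem.List.enumerate words).map (fun p => if PySem.Set.contains selected p.1 then mask_token else p.2)
  PySem.Str.strip (PySem.Str.join " " masked)

-- ===== PORT B =====
-- the for-loop writing result[i] = mask_token under the 0 <= i < n guard
def pvScatterMask (words : List String) (top_indices : List Int) (mask_token : String) : List String :=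
  top_indices.foldl
    (fun acc i => if 0 ≤ i ∧ i < (acc.length : Int) then acc.set i.toNat mask_token else acc)
    words

def build_comprehensiveness_text_word_py_alt (words : List String) (top_indices : List Int) (mask_token : String) : String :=
  PySem.Str.strip (PySem.Str.join " " (pvScatterMask words top_indices mask_token))

-- ===== PRECONDITION & SPEC =====
def Spec_build_comprehensiveness_text_word_py (words : List String) (top_indices : List Int) (mask_token : String) (out : String) : Prop := out = build_comprehensiveness_text_word_py_alt words top_indices mask_token
instance (words : List String) (top_indices : List Int) (mask_token : String) (out : String) : Decidable (Spec_build_comprehensiveness_text_word_py words top_indices mask_token out) := by unfold Spec_build_comprehensiveness_text_word_py; infer_instance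

-- ===== CLAIM (what is proved, stated in full; the proofs are below) =====
def Claim_equal_build_comprehensiveness_text_word_py : Prop := ∀ (words : List String) (top_indices : List Int) (mask_token : String), Dom_build_comprehensiveness_text_word_py words top_indices mask_token → Spec_build_comprehensiveness_text_word_py words top_indices mask_token (build_comprehensiveness_text_word_py words top_indices mask_token)

-- ===== LEMMAS AND PROOFS =====

theorem pvScatterMask_getElem? (top_indices : List Int) (words : List String) (mask_token : String)
    (j : Nat) :
    (pvScatterMask words top_indices mask_token)[j]? =
      if (j : Int) ∈ top_indices then words[j]?.map (fun _ => mask_token) else words[j]? := by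
  induction top_indices generalizing words with
  | nil => simp [pvScatterMask]
  | cons a l ih =>
      simp only [pvScatterMask, List.foldl_cons] at *
      rw [ih]
      have hset : ∀ (ws : List String), (0 ≤ a ∧ a < (ws.length : Int)) →
          (ws.set a.toNat mask_token)[j]? =
            if (j : Int) = a then ws[j]?.map (fun _ => mask_token) else ws[j]? := by
        intro ws hw
        by_cases hja : (j : Int) = a
        · have hja' : a.toNat = j := by omega
          have hlt : j < ws.length := by omega
          simp [List.getElem?_set, hja', hja, List.getElem?_eq_getElem hlt] <;> omega
        · have : a.toNat ≠ j := by omega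
          simp [List.getElem?_set, this, hja]
      by_cases hm : (j : Int) ∈ l
      · simp only [hm, if_true, List.mem_cons, or_true, if_true]
        split
        · next h => rw [hset words h]; split <;> cases words[j]? <;> simp
        · rfl
      · simp only [hm, if_false, List.mem_cons, or_false]
        by_cases hja : (j : Int) = a
        · simp only [hja, if_true]
          split
          · next h => rw [hset words h]; simp [hja]
          · next h =>
              have hnot : ¬ j < words.length := by omega
              rw [List.getElem?_eq_none_iff.mpr (by omega)]
              simp
        · simp only [hja, if_false]
          split
          · next h => rw [hset words h]; simp [hja]
          · rfl

theorem pvScatterMask_eq_masked (words : List String) (top_indices : List Int) (mask_token : String) :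
    (PySem.List.enumerate words).map
        (fun p => if PySem.Set.contains (PySem.Set.ofList top_indices) p.1 then mask_token else p.2)
      = pvScatterMask words top_indices mask_token := by
  apply List.ext_getElem?
  intro j
  rw [pvScatterMask_getElem?]
  rw [List.getElem?_map, PySem.List.getElem?_enumerate]
  have hc : PySem.Set.contains (PySem.Set.ofList top_indices) ((0 : Int) + j) = true ↔ (j : Int) ∈ top_indices := by
    rw [PySem.Set.contains_iff, PySem.Set.mem_ofList]
    simp
  by_cases hm : (j : Int) ∈ top_indices <;> cases words[j]? <;> simp [hc, hm]

-- ===== VERDICT (by name: the statement is the Claim_ definition above) =====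
theorem build_comprehensiveness_text_word_py_spec : Claim_equal_build_comprehensiveness_text_word_py := by
  intro words top_indices mask_token _
  unfold Spec_build_comprehensiveness_text_word_py
  show (let selected : PySem.Set Int := PySem.Set.ofList top_indices;
    let masked : List String :=
      (PySem.List.enumerate words).map (fun p => if PySem.Set.contains selected p.1 then mask_token else p.2);
    PySem.Str.strip (PySem.Str.join " " masked)) = _
  simp only []
  unfold build_comprehensiveness_text_word_py_alt
  rw [pvScatterMask_eq_masked]
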